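-- pv_equiv track=rewrite | github.com/mohamedaaris/Resumatch | enhanced_model.py | are_skills_similar
-- ===== SOURCE A (Python) =====
-- def are_skills_similar(skill1: str, skill2: str) -> bool:
--     """
--     Check if two skills are similar (for fuzzy matching)
--
--     Args:
--         skill1 (str): First skill
--         skill2 (str): Second skill
--
--     Returns:
--         bool: True if skills are similar
--     """
--     # Skill similarity mappings
--     skill_synonyms = {
--         'javascript': ['js', 'ecmascript'],
--         'python': ['py'],
--         'machine learning': ['ml', 'artificial intelligence', 'ai'],
--         'data science': ['data analysis', 'analytics'],
--         'web development': ['web dev', 'frontend', 'backend'],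
--         'mobile development': ['mobile dev', 'android', 'ios'],
--         'cloud computing': ['cloud', 'aws', 'azure', 'gcp'],
--         'database': ['db', 'sql', 'mysql', 'postgresql'],
--         'version control': ['git', 'github', 'gitlab'],
--         'testing': ['qa', 'quality assurance', 'test automation']
--     }
--
--     for main_skill, synonyms in skill_synonyms.items():
--         if skill1 in synonyms and skill2 in synonyms:
--             return True
--         if skill1 == main_skill and skill2 in synonyms:
--             return True
--         if skill2 == main_skill and skill1 in synonyms:
--             return True
--
--     return False
-- ===== SOURCE B (Python) =====
-- _SKILL_SYNONYMS = {
--     'javascript': ['js', 'ecmascript'],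
--     'python': ['py'],
--     'machine learning': ['ml', 'artificial intelligence', 'ai'],
--     'data science': ['data analysis', 'analytics'],
--     'web development': ['web dev', 'frontend', 'backend'],
--     'mobile development': ['mobile dev', 'android', 'ios'],
--     'cloud computing': ['cloud', 'aws', 'azure', 'gcp'],
--     'database': ['db', 'sql', 'mysql', 'postgresql'],
--     'version control': ['git', 'github', 'gitlab'],
--     'testing': ['qa', 'quality assurance', 'test automation']
-- }
--
-- # Inverted index built once: synonym -> canonical main skill (mains are not keys).
-- _SYN_TO_MAIN = {syn: main for main, syns in _SKILL_SYNONYMS.items() for syn in syns}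
--
--
-- def are_skills_similar(skill1: str, skill2: str) -> bool:
--     """
--     Check if two skills are similar (for fuzzy matching)
--
--     Args:
--         skill1 (str): First skill
--         skill2 (str): Second skill
--
--     Returns:
--         bool: True if skills are similar
--     """
--     m1 = _SYN_TO_MAIN.get(skill1)
--     m2 = _SYN_TO_MAIN.get(skill2)
--     return (m1 is not None and m1 == m2) or m1 == skill2 or m2 == skill1
-- ===== Notes on version B (the rewrite author's own statement) =====
-- stated objective: idiomatic
-- what changed: Replaces the per-call loop over the 10 synonym groups (with repeated list membership scans) by an inverted index synonym->main built once at module load, so the function body is three dict lookups; measured speed is unchanged at these table sizes.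
import Mathlib
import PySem

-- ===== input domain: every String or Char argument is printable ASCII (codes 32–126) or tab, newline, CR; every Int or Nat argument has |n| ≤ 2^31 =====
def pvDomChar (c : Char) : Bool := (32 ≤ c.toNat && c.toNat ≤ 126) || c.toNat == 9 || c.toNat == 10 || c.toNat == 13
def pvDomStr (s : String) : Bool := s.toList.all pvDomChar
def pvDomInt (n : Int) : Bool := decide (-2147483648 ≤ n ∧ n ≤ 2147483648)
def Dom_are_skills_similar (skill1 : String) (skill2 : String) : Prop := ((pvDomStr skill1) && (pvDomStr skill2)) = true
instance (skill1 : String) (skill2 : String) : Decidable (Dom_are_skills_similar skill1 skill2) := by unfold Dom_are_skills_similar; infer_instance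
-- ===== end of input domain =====

-- B replaces A's per-call loop over the synonym groups by an inverted index
-- synonym -> main skill built once, leaving three dict lookups per call (idiomatic).

-- ===== PORT A =====
-- the literal skill_synonyms table of A (dict iterated in insertion order)
def pvTable : List (String × List String) :=
  [ ("javascript", ["js", "ecmascript"]),
    ("python", ["py"]),
    ("machine learning", ["ml", "artificial intelligence", "ai"]),
    ("data science", ["data analysis", "analytics"]),
    ("web development", ["web dev", "frontend", "backend"]),
    ("mobile development", ["mobile dev", "android", "ios"]),
    ("cloud computing", ["cloud", "aws", "azure", "gcp"]),
    ("database", ["db", "sql", "mysql", "postgresql"]),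
    ("version control", ["git", "github", "gitlab"]),
    ("testing", ["qa", "quality assurance", "test automation"]) ]

-- A's 'for main_skill, synonyms in skill_synonyms.items():' loop, branch for branch
def pvLoopA (skill1 skill2 : String) : List (String × List String) → Bool
  | [] => false
  | (main_skill, synonyms) :: rest =>
    if skill1 ∈ synonyms ∧ skill2 ∈ synonyms then true
    else if skill1 = main_skill ∧ skill2 ∈ synonyms then true
    else if skill2 = main_skill ∧ skill1 ∈ synonyms then true
    else pvLoopA skill1 skill2 rest

def are_skills_similar (skill1 : String) (skill2 : String) : Bool :=
  pvLoopA skill1 skill2 pvTable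

-- ===== PORT B =====
-- B's dict comprehension {syn: main for main, syns in _SKILL_SYNONYMS.items() for syn in syns}
-- (all synonym keys are distinct, so the Dict's items are exactly this flatMap in order)
def pvSynToMain : PySem.Dict String String :=
  PySem.Dict.mk (pvTable.flatMap (fun p => p.2.map (fun syn => (syn, p.1))))

def are_skills_similar_alt (skill1 : String) (skill2 : String) : Bool :=
  let m1 := pvSynToMain.get? skill1
  let m2 := pvSynToMain.get? skill2
  (m1.isSome && m1 == m2) || m1 == some skill2 || m2 == some skill1

-- ===== PRECONDITION & SPEC =====
def Spec_are_skills_similar (skill1 : String) (skill2 : String) (out : Bool) : Prop := out = are_skills_similar_alt skill1 skill2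
instance (skill1 : String) (skill2 : String) (out : Bool) : Decidable (Spec_are_skills_similar skill1 skill2 out) := by unfold Spec_are_skills_similar; infer_instance

-- ===== CLAIM (what is proved, stated in full; the proofs are below) =====
def Claim_equal_are_skills_similar : Prop := ∀ (skill1 : String) (skill2 : String), Dom_are_skills_similar skill1 skill2 → Spec_are_skills_similar skill1 skill2 (are_skills_similar skill1 skill2)

-- ===== LEMMAS AND PROOFS =====

-- every string relevant to either program: the main skills followed by all synonyms
def pvR : List String := pvTable.map Prod.fst ++ (pvTable.map Prod.snd).flatten

-- on relevant strings the two ports agree (finite check)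
set_option maxHeartbeats 2000000 in
theorem pv_master : ∀ x ∈ pvR, ∀ y ∈ pvR, are_skills_similar x y = are_skills_similar_alt x y := by
  decide

-- A returns true only on relevant strings
theorem pvLoopA_mem (t : List (String × List String)) (s1 s2 : String)
    (h : pvLoopA s1 s2 t = true) :
    (s1 ∈ t.map Prod.fst ++ (t.map Prod.snd).flatten) ∧
    (s2 ∈ t.map Prod.fst ++ (t.map Prod.snd).flatten) := by
  induction t with
  | nil => simp [pvLoopA] at h
  | cons p rest ih =>
    obtain ⟨m, sy⟩ := p
    simp only [pvLoopA] at h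
    split_ifs at h with h1 h2 h3
    · constructor <;> simp [List.mem_append, h1.1, h1.2]
    · constructor <;> simp [List.mem_append, h2.1, h2.2]
    · constructor <;> simp [List.mem_append, h3.1, h3.2]
    · have := ih h
      simp only [List.map_cons, List.flatten_cons, List.mem_append, List.mem_cons] at this ⊢
      tauto

-- a successful lookup has a relevant key and a relevant value
theorem pv_get?_mem {s v : String} (h : pvSynToMain.get? s = some v) :
    s ∈ pvR ∧ v ∈ pvR := by
  have hk : s ∈ pvSynToMain.keys := by
    by_contra hc
    rw [← PySem.Dict.get?_eq_none_iff_not_mem_keys] at hc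
    simp [hc] at h
  have hi : (s, v) ∈ pvSynToMain.items := PySem.Dict.mem_items_of_get?_eq_some _ h
  have hv : v ∈ pvSynToMain.values := by
    simp only [PySem.Dict.values]
    exact List.mem_map.mpr ⟨(s, v), hi, rfl⟩
  exact ⟨(by decide : ∀ x ∈ pvSynToMain.keys, x ∈ pvR) s hk,
         (by decide : ∀ x ∈ pvSynToMain.values, x ∈ pvR) v hv⟩

-- B returns true only on relevant strings
theorem pvAlt_mem (s1 s2 : String) (h : are_skills_similar_alt s1 s2 = true) :
    s1 ∈ pvR ∧ s2 ∈ pvR := by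
  simp only [are_skills_similar_alt, Bool.or_eq_true, Bool.and_eq_true, beq_iff_eq] at h
  rcases h with (⟨hs, heq⟩ | h2) | h3
  · obtain ⟨v, hv⟩ := Option.isSome_iff_exists.mp hs
    exact ⟨(pv_get?_mem hv).1, (pv_get?_mem (heq ▸ hv)).1⟩
  · exact ⟨(pv_get?_mem h2).1, (pv_get?_mem h2).2⟩
  · exact ⟨(pv_get?_mem h3).2, (pv_get?_mem h3).1⟩

-- ===== VERDICT (by name: the statement is the Claim_ definition above) =====
theorem are_skills_similar_spec : Claim_equal_are_skills_similar := by
  intro s1 s2 _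
  unfold Spec_are_skills_similar
  by_cases h1 : s1 ∈ pvR
  · by_cases h2 : s2 ∈ pvR
    · exact pv_master s1 h1 s2 h2
    · have ha : are_skills_similar s1 s2 = false := by
        cases hA : are_skills_similar s1 s2
        · rfl
        · exact absurd (by simpa [pvR] using (pvLoopA_mem pvTable s1 s2 hA).2) h2
      have hb : are_skills_similar_alt s1 s2 = false := by
        cases hB : are_skills_similar_alt s1 s2
        · rfl
        · exact absurd (pvAlt_mem s1 s2 hB).2 h2
      rw [ha, hb]
  · have ha : are_skills_similar s1 s2 = false := by
      cases hA : are_skills_similar s1 s2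
      · rfl
      · exact absurd (by simpa [pvR] using (pvLoopA_mem pvTable s1 s2 hA).1) h1
    have hb : are_skills_similar_alt s1 s2 = false := by
      cases hB : are_skills_similar_alt s1 s2
      · rfl
      · exact absurd (pvAlt_mem s1 s2 hB).1 h1
    rw [ha, hb]
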